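-- pv_equiv track=rewrite | github.com/kang2000h/Deep_Learning | rnn/preprocess/Endpoint_Detecter.py | find_end_energy
-- ===== SOURCE A (Python) =====
-- def find_end_energy(energy, start_interval, IAV_thresh, check=5):
--     '''
--     :param energy: a vector of Integral Absolute Values of the energy from audio
--     :param start_interval: starting point to search end point
--     :param IAV_thresh: .
--     :param check: how much you wanna check energy seq whether it is less than IAV threshold or not
--     :return: A index of energy vector
--     '''
--     count = 0
--     for i in range(start_interval, len(energy)):
--         if energy[i] < IAV_thresh:
--             count += 1
--             if count==check:
--                 end_interval = i -(check-1)
--                 return end_interval # first small one less than threshold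
--         else :
--             count=0
--     return 0
-- ===== SOURCE B (Python) =====
-- def find_end_energy(energy, start_interval, IAV_thresh, check=5):
--     # Build (index, is_low) flags, group them into maximal runs, then search
--     # for the first low run of sufficient length (run start = A's return value).
--     flags = [(i, energy[i] < IAV_thresh) for i in range(start_interval, len(energy))]
--     runs = []  # (start_index, key, length) of each maximal run
--     while flags:
--         key = flags[0][1]
--         j = 1
--         while j < len(flags) and flags[j][1] == key:
--             j += 1
--         runs.append((flags[0][0], key, j))
--         flags = flags[j:]
--     if check >= 1:
--         for start, key, length in runs:
--             if key and length >= check: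
--                 return start
--     return 0
-- ===== Notes on version B (the rewrite author's own statement) =====
-- stated objective: alternative
-- what changed: Replaces A's fused counting loop (reset-on-high counter with early return) by a build-runs-then-search decomposition: flag each index as low/high, group flags into maximal runs, then return the start of the first low run of length >= check (0 if none or check < 1).
import Mathlib
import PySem

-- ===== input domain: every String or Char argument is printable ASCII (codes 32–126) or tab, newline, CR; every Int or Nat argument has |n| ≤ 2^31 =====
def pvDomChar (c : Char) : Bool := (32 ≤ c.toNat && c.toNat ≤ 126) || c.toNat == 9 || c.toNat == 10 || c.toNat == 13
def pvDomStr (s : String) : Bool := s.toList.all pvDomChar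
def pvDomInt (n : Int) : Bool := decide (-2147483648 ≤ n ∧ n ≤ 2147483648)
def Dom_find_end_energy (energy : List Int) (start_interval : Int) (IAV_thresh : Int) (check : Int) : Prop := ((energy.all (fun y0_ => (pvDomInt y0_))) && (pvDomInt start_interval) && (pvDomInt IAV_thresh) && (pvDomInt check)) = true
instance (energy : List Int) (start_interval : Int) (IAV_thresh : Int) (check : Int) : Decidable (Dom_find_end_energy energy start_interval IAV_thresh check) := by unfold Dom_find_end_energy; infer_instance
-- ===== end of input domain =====

-- B replaces A's fused reset-on-high counting loop by a build-runs-then-search decomposition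
-- (same O(n) cost, different structure); equivalence is about the return value only (no mutation).

-- ===== PORT A =====
-- A's for-loop over range(start_interval, len(energy)) with the running counter `count`;
-- a `none` from pyGet? is Python's IndexError, excluded by Pre_ (the 0 there is never claimed about).
def pvGoA (energy : List Int) (IAV_thresh : Int) (check : Int) : List Int → Int → Int
  | [], _ => 0
  | i :: rest, count =>
    match PySem.List.pyGet? energy i with
    | none => 0
    | some v =>
      if v < IAV_thresh then
        if count + 1 = check then i - (check - 1)
        else pvGoA energy IAV_thresh check rest (count + 1)
      else pvGoA energy IAV_thresh check rest 0

def find_end_energy (energy : List Int) (start_interval : Int) (IAV_thresh : Int) (check : Int) : Int :=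
  pvGoA energy IAV_thresh check (PySem.List.pyRange start_interval (energy.length : Int) 1) 0

-- ===== PORT B =====
-- Source B phase 0: the (index, is_low) flag list; `none` = IndexError, excluded by Pre_.
def pvFlags (energy : List Int) (IAV_thresh : Int) : List Int → List (Int × Bool)
  | [] => []
  | i :: rest =>
    match PySem.List.pyGet? energy i with
    | none => []
    | some v => (i, decide (v < IAV_thresh)) :: pvFlags energy IAV_thresh rest

-- Source B phase 1 (the while loops): group flags into maximal runs (start, key, length).
def pvRuns : List (Int × Bool) → List (Int × Bool × Int)
  | [] => []
  | (i, k) :: rest =>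
    (i, k, ((rest.takeWhile (fun p => p.2 == k)).length : Int) + 1) ::
      pvRuns (rest.dropWhile (fun p => p.2 == k))
  termination_by l => l.length
  decreasing_by
    have := List.length_dropWhile_le (fun p => p.2 == k) rest
    simp; omega

-- Source B phase 2: first low run of length ≥ check.
def pvSearch (check : Int) : List (Int × Bool × Int) → Int
  | [] => 0
  | (s, k, n) :: rest => if k = true ∧ check ≤ n then s else pvSearch check rest

def find_end_energy_alt (energy : List Int) (start_interval : Int) (IAV_thresh : Int) (check : Int) : Int :=
  if 1 ≤ check then
    pvSearch check (pvRuns (pvFlags energy IAV_thresh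
      (PySem.List.pyRange start_interval (energy.length : Int) 1)))
  else 0

-- ===== PRECONDITION & SPEC =====
-- Both programs index energy[i] for every i in range(start_interval, len(energy)); Python raises
-- IndexError exactly when start_interval < -len(energy) (the first such access). Pre_ excludes
-- exactly those raising inputs; A returns on everything Pre_ admits.
def Pre_find_end_energy (energy : List Int) (start_interval : Int) (IAV_thresh : Int) (check : Int) : Prop :=
  -(energy.length : Int) ≤ start_interval
instance (energy : List Int) (start_interval : Int) (IAV_thresh : Int) (check : Int) : Decidable (Pre_find_end_energy energy start_interval IAV_thresh check) := by unfold Pre_find_end_energy; infer_instance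

def pvWitness_find_end_energy : List Int × Int × Int × Int := ([4, 9, 1, 1, 7], 1, 3, 2)

def Spec_find_end_energy (energy : List Int) (start_interval : Int) (IAV_thresh : Int) (check : Int) (out : Int) : Prop := out = find_end_energy_alt energy start_interval IAV_thresh check
instance (energy : List Int) (start_interval : Int) (IAV_thresh : Int) (check : Int) (out : Int) : Decidable (Spec_find_end_energy energy start_interval IAV_thresh check out) := by unfold Spec_find_end_energy; infer_instance

-- ===== CLAIM (what is proved, stated in full; the proofs are below) =====
def Claim_equal_find_end_energy : Prop := ∀ (energy : List Int) (start_interval : Int) (IAV_thresh : Int) (check : Int), Dom_find_end_energy energy start_interval IAV_thresh check → Pre_find_end_energy energy start_interval IAV_thresh check → Spec_find_end_energy energy start_interval IAV_thresh check (find_end_energy energy start_interval IAV_thresh check)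

-- ===== LEMMAS AND PROOFS =====

-- A's loop rephrased over the flag list (proof-only helper).
def pvGoF (check : Int) : List (Int × Bool) → Int → Int
  | [], _ => 0
  | (i, k) :: rest, c =>
    if k then
      if c + 1 = check then i - (check - 1) else pvGoF check rest (c + 1)
    else pvGoF check rest 0

theorem pvGoF_cons (check i : Int) (k : Bool) (rest : List (Int × Bool)) (c : Int) :
    pvGoF check ((i, k) :: rest) c =
      if k then (if c + 1 = check then i - (check - 1) else pvGoF check rest (c + 1))
      else pvGoF check rest 0 := rfl

-- Bridge: when every index is in range, A's loop is pvGoF on the flag list.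
theorem pvGoA_eq_goF (energy : List Int) (th check : Int) (xs : List Int) (c : Int)
    (h : ∀ i ∈ xs, PySem.Raise.InRange energy.length i) :
    pvGoA energy th check xs c = pvGoF check (pvFlags energy th xs) c := by
  induction xs generalizing c with
  | nil => rfl
  | cons i rest ih =>
    have hin : PySem.Raise.InRange energy.length i := h i (by simp)
    have hsome : PySem.List.pyGet? energy i ≠ none := fun hn =>
      (PySem.List.pyGet?_eq_none_iff energy i).mp hn hin
    obtain ⟨v, hv⟩ := Option.ne_none_iff_exists'.mp hsome
    have hrest : ∀ j ∈ rest, PySem.Raise.InRange energy.length j :=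
      fun j hj => h j (by simp [hj])
    by_cases hlt : v < th
    · simp only [pvGoA, pvFlags, hv, pvGoF_cons, if_pos hlt, decide_eq_true hlt, if_true]
      split
      · rfl
      · exact ih _ hrest
    · simp only [pvGoA, pvFlags, hv, pvGoF_cons, if_neg hlt, decide_eq_false hlt,
        Bool.false_eq_true, if_false]
      exact ih _ hrest

-- If check < 1 the counter (kept nonnegative) never equals check, so A's loop returns 0.
theorem pvGoF_of_check_nonpos (check : Int) (hc : ¬ 1 ≤ check) :
    ∀ (fl : List (Int × Bool)) (c : Int), 0 ≤ c → pvGoF check fl c = 0 := by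
  intro fl
  induction fl with
  | nil => intro c _; rfl
  | cons p rest ih =>
    intro c hcge
    obtain ⟨i, k⟩ := p
    rw [pvGoF_cons]
    cases k with
    | false => simpa using ih 0 (by omega)
    | true =>
      rw [if_pos rfl, if_neg (show ¬ (c + 1 = check) by omega)]
      exact ih (c + 1) (by omega)

-- A run of high (flag false) samples just resets the counter.
theorem pvGoF_false_run (check : Int) (d : List (Int × Bool)) :
    ∀ l : List (Int × Bool), (∀ p ∈ l, p.2 = false) →
    pvGoF check (l ++ d) 0 = pvGoF check d 0 := by
  intro l
  induction l with
  | nil => intro _; simp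
  | cons p rest ih =>
    intro hall
    obtain ⟨i, k⟩ := p
    have hk : k = false := hall (i, k) (by simp)
    subst hk
    rw [List.cons_append, pvGoF_cons, if_neg (by simp)]
    exact ih fun q hq => hall q (by simp [hq])

-- A low run too short to finish just advances the counter by its length.
theorem pvGoF_true_short (check : Int) (d : List (Int × Bool)) :
    ∀ (l : List (Int × Bool)) (c : Int), (∀ p ∈ l, p.2 = true) → 0 ≤ c →
    c + l.length < check → pvGoF check (l ++ d) c = pvGoF check d (c + l.length) := by
  intro l
  induction l with
  | nil => intro c _ _ _; simp
  | cons p rest ih =>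
    intro c hall hc0 hshort
    obtain ⟨i, k⟩ := p
    have hk : k = true := hall (i, k) (by simp)
    subst hk
    have hlen : c + 1 + (rest.length : Int) < check := by
      simp only [List.length_cons] at hshort; push_cast at hshort ⊢; omega
    have hlen0 : (0 : Int) ≤ (rest.length : Int) := by positivity
    rw [List.cons_append, pvGoF_cons, if_pos rfl,
      if_neg (show ¬ (c + 1 = check) by omega),
      ih (c + 1) (fun q hq => hall q (by simp [hq])) (by omega) hlen]
    congr 1
    simp only [List.length_cons]; push_cast; ring

-- A low run long enough to finish: the counter reaches check at offset check-1-c,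
-- and A returns the run's start minus the carried-in count.
theorem pvGoF_true_long (check : Int) :
    ∀ (r d : List (Int × Bool)) (c i : Int),
    (∀ p ∈ r, p.2 = true) → List.IsChain (fun p q : Int × Bool => q.1 = p.1 + 1) r →
    r.head?.map Prod.fst = some i → 0 ≤ c → c < check → check ≤ c + r.length →
    pvGoF check (r ++ d) c = i - c := by
  intro r
  induction r with
  | nil => intro d c i _ _ hh _ _ _; simp at hh
  | cons p rest ih =>
    intro d c i hall hch hh hc0 hclt hcle
    obtain ⟨j, k⟩ := p
    have hk : k = true := hall (j, k) (by simp)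
    subst hk
    have hji : j = i := by simpa using hh
    rw [List.cons_append, pvGoF_cons, if_pos rfl]
    by_cases hfin : c + 1 = check
    · rw [if_pos hfin]; omega
    · rw [if_neg hfin]
      have hrest : rest ≠ [] := by
        intro he; subst he
        simp only [List.length_cons, List.length_nil] at hcle; omega
      obtain ⟨q, rest', rfl⟩ := List.exists_cons_of_ne_nil hrest
      have hq1 : q.1 = j + 1 := (List.isChain_cons.mp hch).1 q rfl
      have hstep := ih d (c + 1) q.1
        (fun x hx => hall x (by simp [hx]))
        (List.isChain_cons.mp hch).2
        (by cases q; simp) (by omega) (by omega)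
        (by simp only [List.length_cons] at hcle ⊢; push_cast at hcle ⊢; omega)
      rw [hstep]; omega

-- Main combinatorial lemma: on a consecutive-index flag list, A's fused loop equals
-- B's runs-then-search (for check ≥ 1).
theorem pvGoF_eq_search (check : Int) (hc : 1 ≤ check) :
    ∀ fl : List (Int × Bool), List.IsChain (fun p q : Int × Bool => q.1 = p.1 + 1) fl →
    pvGoF check fl 0 = pvSearch check (pvRuns fl) := by
  intro fl
  induction fl using pvRuns.induct with
  | case1 => intro _; simp [pvGoF, pvRuns, pvSearch]
  | case2 i k rest ih =>
    intro hch
    set t := rest.takeWhile (fun p => p.2 == k) with ht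
    set d := rest.dropWhile (fun p => p.2 == k) with hd
    have hrest : rest = t ++ d := (List.takeWhile_append_dropWhile).symm
    have htall : ∀ p ∈ t, p.2 = k := by
      intro p hp; simpa using List.mem_takeWhile_imp hp
    have hchd : List.IsChain (fun p q : Int × Bool => q.1 = p.1 + 1) d :=
      hch.suffix ((List.dropWhile_suffix _).trans (List.suffix_cons _ _))
    have hIH := ih hchd
    have hallrun : ∀ p ∈ (i, k) :: t, p.2 = k := by
      intro p hp
      rcases List.mem_cons.mp hp with h | h
      · rw [h]
      · exact htall p h
    rw [pvRuns]
    by_cases hk : k = true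
    · subst hk
      by_cases hlong : check ≤ ((t.length : Int) + 1)
      · -- long low run: search returns its start i; A's loop returns i too
        have hrun : pvGoF check ((i, true) :: (t ++ d)) 0 = i := by
          have := pvGoF_true_long check ((i, true) :: t) d 0 i hallrun
            (hch.prefix (List.cons_prefix_cons.mpr ⟨rfl, (List.takeWhile_prefix _).trans (hrest ▸ List.prefix_rfl)⟩))
            (by simp) le_rfl (by omega)
            (by simp only [List.length_cons]; push_cast; omega)
          simpa using this
        rw [show ((i, true) :: rest) = (i, true) :: (t ++ d) from by rw [← hrest], hrun,
          pvSearch, if_pos ⟨rfl, hlong⟩]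
      · -- short low run: counter carries into d, whose head (if any) is high and resets it
        have hstep : pvGoF check ((i, true) :: rest) 0 = pvGoF check d ((t.length : Int) + 1) := by
          rw [show ((i, true) :: rest) = ((i, true) :: t) ++ d from by rw [hrest, List.cons_append]]
          rw [pvGoF_true_short check d ((i, true) :: t) 0 hallrun le_rfl
            (by simp only [List.length_cons]; push_cast; omega)]
          congr 1
          simp only [List.length_cons]; push_cast; ring
        have hreset : pvGoF check d ((t.length : Int) + 1) = pvGoF check d 0 := by
          cases hdc : d with
          | nil => rfl
          | cons q d' =>
            have hqf : (fun p : Int × Bool => p.2 == true) q = false := by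
              have := List.head?_dropWhile_not (fun p : Int × Bool => p.2 == true) rest
              rw [← hd, hdc] at this; simpa using this
            obtain ⟨qi, qk⟩ := q
            have hqk : qk = false := by simpa using hqf
            subst hqk
            rw [pvGoF_cons, pvGoF_cons, if_neg (by simp), if_neg (by simp)]
        rw [hstep, hreset, hIH, pvSearch, if_neg (by rintro ⟨-, h⟩; exact hlong h)]
    · -- high run: both sides skip it
      have hkf : k = false := by simpa using hk
      subst hkf
      have hstep : pvGoF check ((i, false) :: rest) 0 = pvGoF check d 0 := by
        rw [show ((i, false) :: rest) = ((i, false) :: t) ++ d from by rw [hrest, List.cons_append]]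
        exact pvGoF_false_run check d ((i, false) :: t) hallrun
      rw [hstep, hIH, pvSearch, if_neg (by rintro ⟨h, -⟩; cases h)]

-- The flag list of a consecutive index list has consecutive indices.
theorem pvFlags_chain (energy : List Int) (th : Int) :
    ∀ xs : List Int, List.IsChain (fun a b : Int => b = a + 1) xs →
    List.IsChain (fun p q : Int × Bool => q.1 = p.1 + 1) (pvFlags energy th xs) := by
  intro xs
  induction xs with
  | nil => intro _; simp [pvFlags]
  | cons i rest ih =>
    intro hch
    rw [pvFlags]
    cases hv : PySem.List.pyGet? energy i with
    | none => simp
    | some v =>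
      rw [List.isChain_cons]
      refine ⟨?_, ih (List.isChain_cons.mp hch).2⟩
      intro q hq
      cases rest with
      | nil => simp [pvFlags] at hq
      | cons j rest' =>
        have hji : j = i + 1 := (List.isChain_cons.mp hch).1 j rfl
        rw [pvFlags] at hq
        cases hv2 : PySem.List.pyGet? energy j with
        | none => rw [hv2] at hq; simp at hq
        | some w =>
          rw [hv2] at hq
          have hqe : (j, decide (w < th)) = q := by simpa using hq
          rw [← hqe, hji]

-- pyRange with step 1 is a consecutive chain.
theorem pvChain_pyRange (a b : Int) :
    List.IsChain (fun x y : Int => y = x + 1) (PySem.List.pyRange a b 1) := by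
  rw [List.isChain_iff_getElem]
  intro i hi
  rw [PySem.List.length_pyRange_one] at hi
  rw [PySem.List.getElem_pyRange_one, PySem.List.getElem_pyRange_one]
  push_cast; ring

-- ===== VERDICT (by name: the statement is the Claim_ definition above) =====
theorem find_end_energy_spec : Claim_equal_find_end_energy := by
  intro energy si th check _ hPre
  unfold Spec_find_end_energy find_end_energy find_end_energy_alt
  have hin : ∀ i ∈ PySem.List.pyRange si (energy.length : Int) 1,
      PySem.Raise.InRange energy.length i := by
    intro i hi
    rw [PySem.List.mem_pyRange_one] at hi
    exact ⟨le_trans hPre hi.1, hi.2⟩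
  rw [pvGoA_eq_goF energy th check _ 0 hin]
  by_cases hc : 1 ≤ check
  · rw [if_pos hc]
    exact pvGoF_eq_search check hc _
      (pvFlags_chain energy th _ (pvChain_pyRange si (energy.length : Int)))
  · rw [if_neg hc]
    exact pvGoF_of_check_nonpos check hc _ 0 le_rfl
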